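/- GENERATED by farm/mkstatement.py from design/units.tsv (unit `start_decoder.R13`) and the assertions of Vorbis/Spec/StartDecoderB.lean — do not edit.
   THE STATEMENT of the proof unit `start_decoder.R13`: segment R13 of `start_decoder` (8 instructions; entries 0x115f67;
   exits 0x115f97,0x11655f; ranges 0x115f67-0x115f92)
   takes each of its entry assertions to one of its exit assertions (`Vorbis.Spec.StartDecoder.SegR13`), given the contracts of its callees.
   What the names mean: Vorbis/Spec/Basic.lean (the shared hypotheses), Vorbis/Spec/StartDecoderB.lean (the assertions). The theorem to prove:
   `theorem start_decoder_R13_ok : Vorbis.Spec.start_decoder_R13.Statement`. -/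
import Vorbis.Spec.Reader
import Vorbis.Spec.StartDecoderB
namespace Vorbis.Spec.start_decoder_R13
open X86 X86.User Asan

/-- The statement of unit `start_decoder.R13`. -/
def Statement : Prop :=
  ∀ (Lay : Layout) (_hLay : Lay.hi = 0x1000000) (μ : Microarch) (_hμ : UserX.MicroOK μ) (u₀ : State)
    (_hcode : HasCodeNat Lay u₀ Vorbis.L.start_decoder.entry Vorbis.Code.code_start_decoder.nat Vorbis.L.start_decoder.size)
    (_h_flush_packet : ∀ (others : List Obj) (frames : List (Nat × FrameLayout)) (Blk : Block → Prop) (len : Nat), Calls Lay μ Vorbis.WayInv (Vorbis.conv u₀) Vorbis.L.flush_packet.entry (Vorbis.Spec.flush_packet.spec others frames Blk len))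
    (_h_asan_store4_noabort : Asan.SmallCheck Lay μ Vorbis.WayInv (Vorbis.CodeOK u₀) [.rax, .rcx, .rdx] 4 Vorbis.L.__asan_store4_noabort.entry),
    Vorbis.Spec.StartDecoder.SegR13 Lay μ u₀

end Vorbis.Spec.start_decoder_R13
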